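-- pv_equiv track=rewrite | github.com/nokia/RED | src/RobotFrameworkCore/org.robotframework.ide.core-functions/src/main/python/scripts/red_module_classes.py | _combine_module_name_parts
-- ===== SOURCE A (Python) =====
-- def _combine_module_name_parts(modules_inside, module_name):
--     result = set()
--     pre_index = module_name
--     while True:
--         result.add(pre_index)
--         for inside in modules_inside:
--             result.add(pre_index + '.' + inside)
--         if '.' in pre_index:
--             pre_index = pre_index.split('.', 1)[-1]
--         else:
--             return result
-- ===== SOURCE B (Python) =====
-- def _combine_module_name_parts(modules_inside, module_name):
--     result = {module_name}
--     for m in modules_inside: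
--         result.add(module_name + '.' + m)
--     for i, c in enumerate(module_name):
--         if c == '.':
--             suffix = module_name[i + 1:]
--             result.add(suffix)
--             for m in modules_inside:
--                 result.add(suffix + '.' + m)
--     return result
-- ===== Notes on version B (the rewrite author's own statement) =====
-- stated objective: alternative
-- what changed: Instead of a while-loop that repeatedly re-splits the string with split('.',1)[-1] and re-tests '.' membership, B does a single character scan over module_name (enumerate), and at each dot position it slices the suffix module_name[i+1:] and adds it with its combinations; no split is performed at all.
import Mathlib
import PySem

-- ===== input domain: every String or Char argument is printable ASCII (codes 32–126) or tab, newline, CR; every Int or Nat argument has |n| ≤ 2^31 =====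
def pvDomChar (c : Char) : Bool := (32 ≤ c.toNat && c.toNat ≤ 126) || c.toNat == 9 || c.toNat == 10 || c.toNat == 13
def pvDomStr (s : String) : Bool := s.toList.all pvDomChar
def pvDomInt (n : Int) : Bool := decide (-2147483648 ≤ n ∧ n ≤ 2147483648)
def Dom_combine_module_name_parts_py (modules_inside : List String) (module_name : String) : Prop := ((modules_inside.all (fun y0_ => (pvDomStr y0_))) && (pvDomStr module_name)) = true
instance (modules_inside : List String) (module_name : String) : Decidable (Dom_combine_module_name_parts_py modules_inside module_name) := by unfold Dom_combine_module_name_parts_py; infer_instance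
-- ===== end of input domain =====

-- B replaces A's while-loop that repeatedly re-splits the string via split('.',1)[-1]
-- by a single character scan that slices the suffix at each dot position (objective: alternative).

-- ===== PORT A =====
-- helper for A's `pre_index.split('.', 1)[-1]`
def combineStripA (pre : String) : String :=
  PySem.List.pyGetD ((PySem.Str.splitMax? pre "." 1).getD []) (-1) ""

-- Termination support for A's while-loop (cited transitively by combineLoopA's decreasing_by):
-- step equations of the split helper, its value, and strict shortening of the stripped remainder.
lemma pvGoZero (m : Nat) (l cur : List Char) (acc : List (List Char)) :
    PySem.Chars.splitOnMax.go ['.'] 0 m l cur acc = ((cur.reverse ++ l) :: acc).reverse := rfl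

lemma pvGoNil (f m : Nat) (cur : List Char) (acc : List (List Char)) :
    PySem.Chars.splitOnMax.go ['.'] (f+1) m [] cur acc = (cur.reverse :: acc).reverse := rfl

lemma pvGoCons (f m : Nat) (c : Char) (rest cur : List Char) (acc : List (List Char)) :
    PySem.Chars.splitOnMax.go ['.'] (f+1) m (c :: rest) cur acc =
      (if m = 0 then ((cur.reverse ++ (c :: rest)) :: acc).reverse
       else if ['.'].isPrefixOf (c :: rest) then
         PySem.Chars.splitOnMax.go ['.'] f (m-1) rest [] (cur.reverse :: acc)
       else PySem.Chars.splitOnMax.go ['.'] f m rest (c :: cur) acc) := rfl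

lemma pvGo0 (fuel : Nat) (l cur : List Char) (acc : List (List Char)) :
    PySem.Chars.splitOnMax.go ['.'] fuel 0 l cur acc = acc.reverse ++ [cur.reverse ++ l] := by
  cases fuel with
  | zero => rw [pvGoZero]; simp
  | succ f =>
    cases l with
    | nil => rw [pvGoNil]; simp
    | cons c rest => rw [pvGoCons]; simp

lemma pvGo1 (l : List Char) (fuel : Nat) (cur : List Char) (acc : List (List Char))
    (h : l.length ≤ fuel) :
    PySem.Chars.splitOnMax.go ['.'] fuel 1 l cur acc =
      acc.reverse ++ (if '.' ∈ l then
          [cur.reverse ++ l.takeWhile (· ≠ '.'), (l.dropWhile (· ≠ '.')).tail]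
        else [cur.reverse ++ l]) := by
  induction l generalizing fuel cur acc with
  | nil =>
    cases fuel with
    | zero => rw [pvGoZero]; simp
    | succ f => rw [pvGoNil]; simp
  | cons c rest ih =>
    cases fuel with
    | zero => simp at h
    | succ f =>
      rw [pvGoCons]
      by_cases hc : c = '.'
      · subst hc
        have hpre : ['.'].isPrefixOf ('.' :: rest) = true := by simp [List.isPrefixOf]
        rw [if_neg (by omega), if_pos hpre]
        rw [pvGo0]
        simp [List.takeWhile, List.dropWhile]
      · have hpre : ['.'].isPrefixOf (c :: rest) = false := by
          simp only [List.isPrefixOf, Bool.and_true, beq_eq_false_iff_ne]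
          exact fun hh => hc hh.symm
        rw [if_neg (by omega), hpre]
        simp only [Bool.false_eq_true, if_false]
        rw [ih f (c :: cur) acc (by simpa using Nat.le_of_succ_le_succ h)]
        by_cases hd : '.' ∈ rest
        · have hd' : '.' ∈ c :: rest := List.mem_cons_of_mem _ hd
          rw [if_pos hd, if_pos hd']
          simp [List.takeWhile, List.dropWhile, hc]
        · have hd' : '.' ∉ c :: rest := by
            intro hh; rcases List.mem_cons.mp hh with h1 | h2
            · exact hc h1.symm
            · exact hd h2
          rw [if_neg hd, if_neg hd']
          simp

lemma pvSplitOnMax1 (l : List Char) :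
    PySem.Chars.splitOnMax l ['.'] 1 =
      (if '.' ∈ l then [l.takeWhile (· ≠ '.'), (l.dropWhile (· ≠ '.')).tail] else [l]) := by
  unfold PySem.Chars.splitOnMax
  rw [if_neg (by omega)]
  have : (1 : Int).toNat = 1 := rfl
  rw [this, pvGo1 l (l.length + 1) [] [] (by omega)]
  simp

lemma pvStripA_toList (pre : String) :
    (combineStripA pre).toList =
      (if '.' ∈ pre.toList then (pre.toList.dropWhile (· ≠ '.')).tail else pre.toList) := by
  unfold combineStripA
  have hchars : PySem.Chars.splitMax? pre.toList ['.'] 1 =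
      some (PySem.Chars.splitOnMax pre.toList ['.'] 1) := by
    simp [PySem.Chars.splitMax?]
  have hb := PySem.Str.splitMax?_map pre "." 1
  have hdot : ("." : String).toList = ['.'] := rfl
  rw [hdot, hchars] at hb
  obtain ⟨parts, hp, hmap⟩ := Option.map_eq_some_iff.mp hb
  rw [hp]
  have hmap' : parts.map String.toList = PySem.Chars.splitOnMax pre.toList ['.'] 1 := hmap
  rw [pvSplitOnMax1] at hmap'
  by_cases hd : '.' ∈ pre.toList
  · rw [if_pos hd] at hmap' ⊢
    have hne : parts ≠ [] := by
      intro h0; rw [h0] at hmap'; simp at hmap'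
    rw [Option.getD_some, PySem.List.pyGetD_neg_one parts "" hne]
    have h1 : (parts.map String.toList).getLast? = some ((pre.toList.dropWhile (· ≠ '.')).tail) := by
      rw [hmap']; rfl
    rw [List.getLast?_map] at h1
    rw [List.getLast?_eq_some_getLast hne] at h1
    simpa using h1
  · rw [if_neg hd] at hmap' ⊢
    have hne : parts ≠ [] := by
      intro h0; rw [h0] at hmap'; simp at hmap'
    rw [Option.getD_some, PySem.List.pyGetD_neg_one parts "" hne]
    have h1 : (parts.map String.toList).getLast? = some pre.toList := by
      rw [hmap']; rfl
    rw [List.getLast?_map] at h1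
    rw [List.getLast?_eq_some_getLast hne] at h1
    simpa using h1

lemma pvIsInDot (s : String) : PySem.Str.isIn "." s = true ↔ '.' ∈ s.toList := by
  have hdot : ("." : String).toList = ['.'] := rfl
  rw [show PySem.Str.isIn "." s = PySem.Chars.isIn ("." : String).toList s.toList from rfl, hdot,
    PySem.Chars.isIn_iff_infix, List.singleton_infix_iff]

lemma pvStripA_lt (pre : String) (h : PySem.Str.isIn "." pre = true) :
    (combineStripA pre).toList.length < pre.toList.length := by
  have hd : '.' ∈ pre.toList := (pvIsInDot pre).mp h
  rw [pvStripA_toList, if_pos hd]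
  have hne : pre.toList.dropWhile (· ≠ '.') ≠ [] := by
    intro h0
    have := List.takeWhile_append_dropWhile (p := (· ≠ '.')) (l := pre.toList)
    rw [h0, List.append_nil] at this
    rw [← this] at hd
    have := List.mem_takeWhile_imp hd
    simp at this
  have h1 : (pre.toList.dropWhile (· ≠ '.')).length ≤ pre.toList.length :=
    List.length_dropWhile_le _ _
  have h2 : 0 < (pre.toList.dropWhile (· ≠ '.')).length := List.length_pos_iff.mpr hne
  rw [List.length_tail]
  omega

def combineLoopA (modules_inside : List String) (result : PySem.Set String) (pre : String) :
    PySem.Set String :=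
  let result1 := PySem.Set.add result pre
  let result2 := modules_inside.foldl (fun r inside => PySem.Set.add r (pre ++ "." ++ inside)) result1
  if h : PySem.Str.isIn "." pre = true then
    combineLoopA modules_inside result2 (combineStripA pre)
  else result2
termination_by pre.toList.length
decreasing_by exact pvStripA_lt pre h

def combine_module_name_parts_py (modules_inside : List String) (module_name : String) :
    List String :=
  combineLoopA modules_inside PySem.Set.empty module_name

-- ===== PORT B =====
-- B: one scan over the characters; at each dot position i take the slice module_name[i+1:]
def combine_module_name_parts_py_alt (modules_inside : List String) (module_name : String) :
    List String :=
  let result0 := PySem.Set.add PySem.Set.empty module_name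
  let result1 := modules_inside.foldl
    (fun r m => PySem.Set.add r (module_name ++ "." ++ m)) result0
  (PySem.List.enumerate module_name.toList).foldl
    (fun r ic =>
      if ic.2 = '.' then
        let suffix := PySem.Str.slice module_name (some (ic.1 + 1)) none
        modules_inside.foldl (fun r m => PySem.Set.add r (suffix ++ "." ++ m))
          (PySem.Set.add r suffix)
      else r)
    result1

-- ===== PRECONDITION & SPEC =====
def Spec_combine_module_name_parts_py (modules_inside : List String) (module_name : String) (out : List String) : Prop := out = combine_module_name_parts_py_alt modules_inside module_name
instance (modules_inside : List String) (module_name : String) (out : List String) : Decidable (Spec_combine_module_name_parts_py modules_inside module_name out) := by unfold Spec_combine_module_name_parts_py; infer_instance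

-- ===== CLAIM (what is proved, stated in full; the proofs are below) =====
def Claim_equal_combine_module_name_parts_py : Prop := ∀ (modules_inside : List String) (module_name : String), Dom_combine_module_name_parts_py modules_inside module_name → Spec_combine_module_name_parts_py modules_inside module_name (combine_module_name_parts_py modules_inside module_name)

-- ===== LEMMAS AND PROOFS =====

-- splitting a char list at '.': first piece and remaining pieces
def pvSplitDot : List Char → List Char × List (List Char)
  | [] => ([], [])
  | c :: rest =>
    let pr := pvSplitDot rest
    if c = '.' then ([], pr.1 :: pr.2) else (c :: pr.1, pr.2)

lemma pvSplitDot_cons (c : Char) (rest : List Char) :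
    pvSplitDot (c :: rest) =
      (if c = '.' then ([], (pvSplitDot rest).1 :: (pvSplitDot rest).2)
       else (c :: (pvSplitDot rest).1, (pvSplitDot rest).2)) := rfl

lemma pvJoinDot (l : List Char) :
    PySem.Chars.join ['.'] ((pvSplitDot l).1 :: (pvSplitDot l).2) = l := by
  induction l with
  | nil => simp [pvSplitDot, PySem.Chars.join_singleton]
  | cons c rest ih =>
    rw [pvSplitDot_cons]
    by_cases hc : c = '.'
    · subst hc
      rw [if_pos rfl, PySem.Chars.join_cons_cons, ih]
      simp
    · rw [if_neg hc]
      rcases hps : (pvSplitDot rest).2 with _ | ⟨q, qs⟩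
      · rw [hps, PySem.Chars.join_singleton] at ih
        show PySem.Chars.join ['.'] [c :: (pvSplitDot rest).1] = c :: rest
        rw [PySem.Chars.join_singleton, ih]
      · rw [hps, PySem.Chars.join_cons_cons] at ih
        show PySem.Chars.join ['.'] ((c :: (pvSplitDot rest).1) :: q :: qs) = c :: rest
        rw [PySem.Chars.join_cons_cons]
        simp only [List.cons_append]
        rw [ih]

lemma pvDotFree (l : List Char) :
    '.' ∉ (pvSplitDot l).1 ∧ ∀ p ∈ (pvSplitDot l).2, '.' ∉ p := by
  induction l with
  | nil => simp [pvSplitDot]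
  | cons c rest ih =>
    rw [pvSplitDot_cons]
    by_cases hc : c = '.'
    · rw [if_pos hc]
      refine ⟨by simp, ?_⟩
      intro p hp
      rcases List.mem_cons.mp hp with h1 | h2
      · rw [h1]; exact ih.1
      · exact ih.2 p h2
    · rw [if_neg hc]
      refine ⟨?_, ih.2⟩
      intro hh
      rcases List.mem_cons.mp hh with h1 | h2
      · exact hc h1.symm
      · exact ih.1 h2

lemma pvDropDot (a r : List Char) (ha : '.' ∉ a) :
    ((a ++ '.' :: r).dropWhile (· ≠ '.')).tail = r := by
  induction a with
  | nil => simp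
  | cons c a' ih =>
    have hc : c ≠ '.' := fun hh => ha (by simp [hh])
    have ha' : '.' ∉ a' := fun hh => ha (by simp [hh])
    rw [List.cons_append, List.dropWhile_cons, if_pos (by simp [hc])]
    exact ih ha'

-- the strings A inserts, block by block, for each dotted suffix
def blocksB (mi : List String) : List String → List String
  | [] => []
  | p :: ps =>
    (PySem.Str.join "." (p :: ps) ::
      mi.map (fun m => PySem.Str.join "." (p :: ps) ++ "." ++ m)) ++ blocksB mi ps

lemma pvLoopAUnfold (mi : List String) (result : PySem.Set String) (pre : String) :
    combineLoopA mi result pre =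
      (if PySem.Str.isIn "." pre = true then
         combineLoopA mi
           (PySem.Set.update result (pre :: mi.map (fun m => pre ++ "." ++ m)))
           (combineStripA pre)
       else PySem.Set.update result (pre :: mi.map (fun m => pre ++ "." ++ m))) := by
  rw [combineLoopA.eq_def]
  simp only [← PySem.Set.update_map_eq_foldl_add, ← PySem.Set.update_cons]
  by_cases h : PySem.Str.isIn "." pre = true <;> simp only [h] <;> simp

lemma pvLoopAEq (mi : List String) :
    ∀ (parts : List String) (p : String) (result : PySem.Set String) (pre : String),
      pre.toList = PySem.Chars.join ['.'] ((p :: parts).map String.toList) →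
      (∀ q ∈ p :: parts, '.' ∉ q.toList) →
      combineLoopA mi result pre = PySem.Set.update result (blocksB mi (p :: parts)) := by
  intro parts
  induction parts with
  | nil =>
    intro p result pre hpre hdf
    have hpre' : pre = PySem.Str.join "." [p] := by
      apply String.toList_inj.mp
      rw [PySem.Str.toList_join]
      simpa [PySem.Chars.join_singleton] using hpre
    have hnd : '.' ∉ pre.toList := by
      rw [hpre, List.map_cons, List.map_nil, PySem.Chars.join_singleton]
      exact hdf p (by simp)
    have hfalse : PySem.Str.isIn "." pre = false := by
      cases hb : PySem.Str.isIn "." pre with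
      | false => rfl
      | true => exact absurd ((pvIsInDot pre).mp hb) hnd
    rw [pvLoopAUnfold, hfalse]
    simp only [Bool.false_eq_true, if_false, blocksB]
    rw [hpre']
    simp
  | cons q qs ih =>
    intro p result pre hpre hdf
    have hjoin : PySem.Chars.join ['.'] ((p :: q :: qs).map String.toList) =
        p.toList ++ '.' :: PySem.Chars.join ['.'] ((q :: qs).map String.toList) := by
      simp only [List.map_cons]
      rw [PySem.Chars.join_cons_cons]
      simp
    have hpre2 : pre.toList = p.toList ++ '.' :: PySem.Chars.join ['.'] ((q :: qs).map String.toList) := by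
      rw [hpre, hjoin]
    have hpre' : pre = PySem.Str.join "." (p :: q :: qs) := by
      apply String.toList_inj.mp
      rw [PySem.Str.toList_join, hpre]
      rfl
    have hd : '.' ∈ pre.toList := by rw [hpre2]; simp
    have htrue : PySem.Str.isIn "." pre = true := (pvIsInDot pre).mpr hd
    have hstrip : (combineStripA pre).toList =
        PySem.Chars.join ['.'] ((q :: qs).map String.toList) := by
      rw [pvStripA_toList, if_pos hd, hpre2, pvDropDot _ _ (hdf p (by simp))]
    rw [pvLoopAUnfold, htrue]
    simp only [if_true]
    rw [ih q _ (combineStripA pre) hstrip (fun r hr => hdf r (List.mem_cons_of_mem _ hr))]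
    rw [← PySem.Set.update_append]
    rw [hpre']
    rfl

-- ===== B-side: character-scan suffixes =====

-- the proper dotted suffixes of a char list, in left-to-right dot order
def charSuffixes : List Char → List (List Char)
  | [] => []
  | c :: rest => (if c = '.' then [rest] else []) ++ charSuffixes rest

-- the dotted suffixes read off the split pieces
def tailsJoins : List (List Char) → List (List Char)
  | [] => []
  | q :: qs => PySem.Chars.join ['.'] (q :: qs) :: tailsJoins qs

lemma pvCharSuffixesEq (l : List Char) :
    charSuffixes l = tailsJoins (pvSplitDot l).2 := by
  induction l with
  | nil => simp [charSuffixes, pvSplitDot, tailsJoins]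
  | cons c rest ih =>
    rw [pvSplitDot_cons]
    by_cases hc : c = '.'
    · rw [if_pos hc]
      show charSuffixes (c :: rest) = tailsJoins ((pvSplitDot rest).1 :: (pvSplitDot rest).2)
      rw [show charSuffixes (c :: rest) = (if c = '.' then [rest] else []) ++ charSuffixes rest from rfl,
        if_pos hc, ih]
      show rest :: tailsJoins (pvSplitDot rest).2 =
        PySem.Chars.join ['.'] ((pvSplitDot rest).1 :: (pvSplitDot rest).2) :: tailsJoins (pvSplitDot rest).2
      rw [pvJoinDot]
    · rw [if_neg hc]
      show charSuffixes (c :: rest) = tailsJoins (pvSplitDot rest).2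
      rw [show charSuffixes (c :: rest) = (if c = '.' then [rest] else []) ++ charSuffixes rest from rfl,
        if_neg hc, ih]
      simp

-- blocksB is the flatMap of the per-suffix blocks over the tails-joins list
lemma pvBlocksFlat (mi : List String) :
    ∀ (qs : List (List Char)) (q : List Char),
      blocksB mi ((q :: qs).map String.ofList) =
        (tailsJoins (q :: qs)).flatMap
          (fun suf => String.ofList suf :: mi.map (fun m => String.ofList suf ++ "." ++ m)) := by
  intro qs
  induction qs with
  | nil =>
    intro q
    have hjoin : PySem.Str.join "." [String.ofList q] = String.ofList (PySem.Chars.join ['.'] [q]) := by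
      apply String.toList_inj.mp
      rw [PySem.Str.toList_join]
      simp
    simp [blocksB, tailsJoins, hjoin]
  | cons q' qs' ih =>
    intro q
    have hjoin : PySem.Str.join "." ((q :: q' :: qs').map String.ofList) =
        String.ofList (PySem.Chars.join ['.'] (q :: q' :: qs')) := by
      apply String.toList_inj.mp
      rw [PySem.Str.toList_join]
      simp only [List.map_map]
      rw [show (String.toList ∘ String.ofList) = (id : List Char → List Char) from
        funext (fun x => by simp)]
      simp
    show (PySem.Str.join "." ((q :: q' :: qs').map String.ofList) ::
        mi.map (fun m => PySem.Str.join "." ((q :: q' :: qs').map String.ofList) ++ "." ++ m)) ++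
        blocksB mi ((q' :: qs').map String.ofList) = _
    rw [hjoin, ih q']
    rfl

-- reduce B's slice of the suffix to a drop
lemma pvSliceDrop (mn : String) (k : Nat) :
    PySem.Str.slice mn (some ((k : Int) + 1)) none = String.ofList (mn.toList.drop (k + 1)) := by
  have hk : ((k : Int) + 1) = ((k + 1 : Nat) : Int) := by push_cast; ring
  rw [PySem.Str.slice, hk]
  show String.ofList (PySem.List.slice mn.toList (some ((k + 1 : Nat) : Int)) none) = _
  rw [PySem.List.slice_from_natCast]

-- B's scan loop, with the invariant that l is the suffix of mn at offset k
lemma pvFoldB (mi : List String) (mn : String) :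
    ∀ (l : List Char) (k : Nat), mn.toList.drop k = l → ∀ (r : PySem.Set String),
      (PySem.List.enumerate l (k : Int)).foldl
        (fun r ic =>
          if ic.2 = '.' then
            let suffix := PySem.Str.slice mn (some (ic.1 + 1)) none
            mi.foldl (fun r m => PySem.Set.add r (suffix ++ "." ++ m))
              (PySem.Set.add r suffix)
          else r) r =
      PySem.Set.update r ((charSuffixes l).flatMap
        (fun suf => String.ofList suf :: mi.map (fun m => String.ofList suf ++ "." ++ m))) := by
  intro l
  induction l with
  | nil => intro k _ r; simp [charSuffixes, PySem.List.enumerate_nil]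
  | cons c rest ih =>
    intro k hk r
    have hrest : mn.toList.drop (k + 1) = rest := by
      rw [← List.tail_drop, hk]; rfl
    rw [PySem.List.enumerate_cons, List.foldl_cons]
    have ih' := ih (k + 1) hrest
    rw [Nat.cast_add, Nat.cast_one] at ih'
    by_cases hc : c = '.'
    · simp only [hc, reduceIte]
      have hsuf : PySem.Str.slice mn (some ((k : Int) + 1)) none = String.ofList rest := by
        rw [pvSliceDrop, hrest]
      simp only [hsuf]
      have hstep : (mi.foldl
            (fun r m => PySem.Set.add r (String.ofList rest ++ "." ++ m))
            (PySem.Set.add r (String.ofList rest))) =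
          PySem.Set.update r (String.ofList rest ::
            mi.map (fun m => String.ofList rest ++ "." ++ m)) := by
        rw [PySem.Set.update_cons, PySem.Set.update_map_eq_foldl_add]
      rw [hstep, ih']
      rw [← PySem.Set.update_append]
      rw [show charSuffixes ('.' :: rest) = rest :: charSuffixes rest from by
        simp [charSuffixes]]
      simp
    · simp only [if_neg hc]
      rw [ih']
      congr 1
      rw [show charSuffixes (c :: rest) = (if c = '.' then [rest] else []) ++ charSuffixes rest from rfl,
        if_neg hc]
      simp

lemma pvAltEq (mi : List String) (mn : String) :
    combine_module_name_parts_py_alt mi mn =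
      PySem.Set.update PySem.Set.empty
        ((mn :: (charSuffixes mn.toList).map String.ofList).flatMap
          (fun suf => suf :: mi.map (fun m => suf ++ "." ++ m))) := by
  show (PySem.List.enumerate mn.toList (0 : Int)).foldl _
      (mi.foldl (fun r m => PySem.Set.add r (mn ++ "." ++ m))
        (PySem.Set.add PySem.Set.empty mn)) = _
  have h0 : (mi.foldl (fun r m => PySem.Set.add r (mn ++ "." ++ m))
      (PySem.Set.add PySem.Set.empty mn)) =
      PySem.Set.update PySem.Set.empty (mn :: mi.map (fun m => mn ++ "." ++ m)) := by
    rw [PySem.Set.update_cons, PySem.Set.update_map_eq_foldl_add]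
  have hf := pvFoldB mi mn mn.toList 0 (by simp)
  simp only [Nat.cast_zero] at hf
  rw [h0, hf]
  rw [← PySem.Set.update_append]
  congr 1
  rw [List.flatMap_cons]
  congr 1
  rw [List.flatMap_map]

lemma pvMain (mi : List String) (mn : String) :
    combine_module_name_parts_py mi mn = combine_module_name_parts_py_alt mi mn := by
  have hmapToList :
      (((pvSplitDot mn.toList).1 :: (pvSplitDot mn.toList).2).map String.ofList).map String.toList =
      (pvSplitDot mn.toList).1 :: (pvSplitDot mn.toList).2 := by
    rw [List.map_map]
    rw [show (String.toList ∘ String.ofList) = (id : List Char → List Char) from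
      funext (fun l => by simp)]
    simp
  have hpre : mn.toList =
      PySem.Chars.join ['.']
        (((String.ofList (pvSplitDot mn.toList).1 ::
            ((pvSplitDot mn.toList).2).map String.ofList)).map String.toList) := by
    rw [show (String.ofList (pvSplitDot mn.toList).1 ::
        ((pvSplitDot mn.toList).2).map String.ofList) =
        ((pvSplitDot mn.toList).1 :: (pvSplitDot mn.toList).2).map String.ofList from rfl,
      hmapToList, pvJoinDot]
  have hdf : ∀ q ∈ (String.ofList (pvSplitDot mn.toList).1 ::
      ((pvSplitDot mn.toList).2).map String.ofList), '.' ∉ q.toList := by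
    intro q hq
    have hq' : q.toList ∈
        ((((pvSplitDot mn.toList).1 :: (pvSplitDot mn.toList).2).map String.ofList).map String.toList) :=
      List.mem_map_of_mem hq
    rw [hmapToList] at hq'
    rcases List.mem_cons.mp hq' with h1 | h2
    · rw [h1]; exact (pvDotFree mn.toList).1
    · exact (pvDotFree mn.toList).2 _ h2
  have hA : combine_module_name_parts_py mi mn =
      PySem.Set.update PySem.Set.empty
        (blocksB mi (String.ofList (pvSplitDot mn.toList).1 ::
          ((pvSplitDot mn.toList).2).map String.ofList)) := by
    unfold combine_module_name_parts_py
    exact pvLoopAEq mi _ _ PySem.Set.empty mn hpre hdf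
  have hofl : String.ofList mn.toList = mn := by
    apply String.toList_inj.mp; simp
  have hB : combine_module_name_parts_py_alt mi mn =
      PySem.Set.update PySem.Set.empty
        (blocksB mi (String.ofList (pvSplitDot mn.toList).1 ::
          ((pvSplitDot mn.toList).2).map String.ofList)) := by
    rw [pvAltEq]
    rw [show (String.ofList (pvSplitDot mn.toList).1 ::
        ((pvSplitDot mn.toList).2).map String.ofList) =
        ((pvSplitDot mn.toList).1 :: (pvSplitDot mn.toList).2).map String.ofList from rfl,
      pvBlocksFlat mi (pvSplitDot mn.toList).2 (pvSplitDot mn.toList).1]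
    congr 1
    rw [show tailsJoins ((pvSplitDot mn.toList).1 :: (pvSplitDot mn.toList).2) =
        PySem.Chars.join ['.'] ((pvSplitDot mn.toList).1 :: (pvSplitDot mn.toList).2) ::
          tailsJoins (pvSplitDot mn.toList).2 from rfl,
      pvJoinDot, ← pvCharSuffixesEq]
    rw [List.flatMap_cons, List.flatMap_cons, List.flatMap_map, hofl]
  rw [hA, hB]

-- ===== VERDICT (by name: the statement is the Claim_ definition above) =====
theorem combine_module_name_parts_py_spec : Claim_equal_combine_module_name_parts_py := by
  intro mi mn _
  unfold Spec_combine_module_name_parts_py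
  exact pvMain mi mn
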